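-- pv_equiv track=rewrite | github.com/this233/Graph-Agent-for-OpenHarmony | src/hipporag/document_processor.py | _find_parent_chunk
-- ===== SOURCE A (Python) =====
-- from typing import List, Dict, Any, Tuple, Optional
--
-- def _find_parent_chunk(current_chunk_id: str, current_metadata: Dict, all_chunks: Dict) -> Optional[str]:
--     """
--     找到当前chunk的父chunk
--
--     Args:
--         current_chunk_id: 当前chunk的ID
--         current_metadata: 当前chunk的metadata
--         all_chunks: 所有chunk的信息
--
--     Returns:
--         父chunk的ID，如果没有找到则返回None
--     """
--     if len(current_metadata) <= 1:
--         # 顶级chunk没有父chunk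
--         return None
--
--     # 寻找父chunk：metadata长度比当前chunk少1，且是当前metadata的子集
--     for target_length in range(len(current_metadata) - 1, 0, -1):
--         for chunk_id, (chunk_info, metadata, split) in all_chunks.items():
--             if chunk_id == current_chunk_id:
--                 continue
--
--             if len(metadata) == target_length:
--                 is_parent = True
--                 for key, value in metadata.items():
--                     if key not in current_metadata or current_metadata[key] != value:
--                         is_parent = False
--                         break
--
--                 if is_parent:
--                     return chunk_id
--
--     return None
-- ===== SOURCE B (Python) =====
-- from typing import Dict, Optional
--
--
-- def _find_parent_chunk(current_chunk_id: str, current_metadata: Dict, all_chunks: Dict) -> Optional[str]: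
--     """Single pass over all_chunks tracking the best (longest-metadata) subset
--     candidate; strict improvement keeps the earliest chunk in dict order for
--     each length, so the result equals A's (longest first, then dict order)."""
--     top = len(current_metadata)
--     if top <= 1:
--         return None
--
--     best_id = None
--     best_len = 0
--     for chunk_id, (chunk_info, metadata, split) in all_chunks.items():
--         if chunk_id == current_chunk_id:
--             continue
--         m = len(metadata)
--         if best_len < m < top and all(
--             current_metadata.get(k) == v for k, v in metadata.items()
--         ):
--             best_id, best_len = chunk_id, m
--     return best_id
-- ===== Notes on version B (the rewrite author's own statement) =====
-- stated objective: faster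
-- what changed: Replaced the outer loop over candidate metadata lengths (each rescanning every chunk) by a single pass over all_chunks that tracks the strictly-longest subset candidate, which preserves earliest-in-dict-order tie-breaking.
import Mathlib
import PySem

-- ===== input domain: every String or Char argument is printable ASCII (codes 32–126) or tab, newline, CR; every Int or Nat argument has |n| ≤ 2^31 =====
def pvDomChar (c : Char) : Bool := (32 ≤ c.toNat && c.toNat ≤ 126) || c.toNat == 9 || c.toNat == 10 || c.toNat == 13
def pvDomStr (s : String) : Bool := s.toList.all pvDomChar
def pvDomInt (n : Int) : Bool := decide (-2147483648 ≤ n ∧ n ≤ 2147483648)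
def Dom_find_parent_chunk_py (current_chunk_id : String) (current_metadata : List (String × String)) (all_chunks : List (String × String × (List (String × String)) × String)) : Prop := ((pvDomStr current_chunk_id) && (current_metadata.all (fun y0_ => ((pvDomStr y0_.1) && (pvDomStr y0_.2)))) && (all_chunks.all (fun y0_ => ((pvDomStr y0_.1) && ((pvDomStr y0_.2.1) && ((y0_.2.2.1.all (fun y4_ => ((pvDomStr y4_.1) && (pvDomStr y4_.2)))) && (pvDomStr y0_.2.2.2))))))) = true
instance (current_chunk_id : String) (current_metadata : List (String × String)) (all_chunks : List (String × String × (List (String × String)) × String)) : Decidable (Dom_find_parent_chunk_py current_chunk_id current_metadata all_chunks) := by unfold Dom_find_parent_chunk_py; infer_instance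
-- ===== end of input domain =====

-- B replaces A's outer loop over target lengths (each rescanning all chunks) by a
-- single pass tracking the longest subset candidate; same result, fewer scans.


-- ===== PORT A =====
-- A's inner `for key, value in metadata.items(): if key not in current_metadata
-- or current_metadata[key] != value: break` (short-circuit: the lookup happens
-- only when the key is present).
def pvIsParent (cm : PySem.Dict String String) : List (String × String) → Bool
  | [] => true
  | (k, v) :: rest =>
      match cm.get? k with
      | none => false
      | some w => if w ≠ v then false else pvIsParent cm rest

-- A's inner loop over all_chunks.items() for one target_length.
def pvFindAt (current_chunk_id : String) (cm : PySem.Dict String String) (tl : Int) :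
    List (String × String × (List (String × String)) × String) → Option String
  | [] => none
  | (chunk_id, _, metadata, _) :: rest =>
      if chunk_id = current_chunk_id then pvFindAt current_chunk_id cm tl rest
      else
        let md := PySem.Dict.ofList metadata
        if (md.size : Int) = tl then
          if pvIsParent cm md.items then some chunk_id
          else pvFindAt current_chunk_id cm tl rest
        else pvFindAt current_chunk_id cm tl rest

-- A's outer loop `for target_length in range(len(current_metadata)-1, 0, -1)`.
def pvScan (current_chunk_id : String) (cm : PySem.Dict String String)
    (chunks : List (String × String × (List (String × String)) × String)) :
    List Int → Option String
  | [] => none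
  | tl :: rest =>
      match pvFindAt current_chunk_id cm tl chunks with
      | some r => some r
      | none => pvScan current_chunk_id cm chunks rest

def find_parent_chunk_py (current_chunk_id : String) (current_metadata : List (String × String)) (all_chunks : List (String × String × (List (String × String)) × String)) : Option String :=
  let cm := PySem.Dict.ofList current_metadata
  if cm.size ≤ 1 then none
  else
    pvScan current_chunk_id cm (PySem.Dict.ofList all_chunks).items
      (PySem.List.pyRange ((cm.size : Int) - 1) 0 (-1))

-- ===== PORT B =====
-- B's `all(current_metadata.get(k) == v for k, v in metadata.items())`.
def altSubset (cm : PySem.Dict String String) (items : List (String × String)) : Bool :=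
  items.all (fun p => cm.get? p.1 == some p.2)

-- B's single pass: keep (best_id, best_len), update on strict improvement.
def altLoop (current_chunk_id : String) (cm : PySem.Dict String String) (top : Nat) :
    List (String × String × (List (String × String)) × String) →
    Option String × Nat → Option String × Nat
  | [], st => st
  | (chunk_id, _, metadata, _) :: rest, (best_id, best_len) =>
      if chunk_id = current_chunk_id then
        altLoop current_chunk_id cm top rest (best_id, best_len)
      else
        let m := (PySem.Dict.ofList metadata).size
        if best_len < m ∧ m < top ∧ altSubset cm (PySem.Dict.ofList metadata).items then
          altLoop current_chunk_id cm top rest (some chunk_id, m)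
        else altLoop current_chunk_id cm top rest (best_id, best_len)

def find_parent_chunk_py_alt (current_chunk_id : String) (current_metadata : List (String × String)) (all_chunks : List (String × String × (List (String × String)) × String)) : Option String :=
  let cm := PySem.Dict.ofList current_metadata
  let top := cm.size
  if top ≤ 1 then none
  else (altLoop current_chunk_id cm top (PySem.Dict.ofList all_chunks).items (none, 0)).1

-- ===== PRECONDITION & SPEC =====
def Spec_find_parent_chunk_py (current_chunk_id : String) (current_metadata : List (String × String)) (all_chunks : List (String × String × (List (String × String)) × String)) (out : Option String) : Prop := out = find_parent_chunk_py_alt current_chunk_id current_metadata all_chunks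
instance (current_chunk_id : String) (current_metadata : List (String × String)) (all_chunks : List (String × String × (List (String × String)) × String)) (out : Option String) : Decidable (Spec_find_parent_chunk_py current_chunk_id current_metadata all_chunks out) := by unfold Spec_find_parent_chunk_py; infer_instance

-- ===== CLAIM (what is proved, stated in full; the proofs are below) =====
def Claim_equal_find_parent_chunk_py : Prop := ∀ (current_chunk_id : String) (current_metadata : List (String × String)) (all_chunks : List (String × String × (List (String × String)) × String)), Dom_find_parent_chunk_py current_chunk_id current_metadata all_chunks → Spec_find_parent_chunk_py current_chunk_id current_metadata all_chunks (find_parent_chunk_py current_chunk_id current_metadata all_chunks)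

-- ===== LEMMAS AND PROOFS =====

-- metadata length of a chunk entry
def pvMv (c : String × String × (List (String × String)) × String) : Nat :=
  (PySem.Dict.ofList c.2.2.1).size

-- "chunk is a candidate regardless of length": different id and metadata ⊆ cm
def pvOk (cid : String) (cm : PySem.Dict String String)
    (c : String × String × (List (String × String)) × String) : Bool :=
  decide (c.1 ≠ cid) && altSubset cm (PySem.Dict.ofList c.2.2.1).items

-- eligible with metadata length in (lo, hi]
def pvElig (cid : String) (cm : PySem.Dict String String) (lo hi : Nat)
    (c : String × String × (List (String × String)) × String) : Bool :=
  pvOk cid cm c && decide (lo < pvMv c) && decide (pvMv c ≤ hi)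

-- maximum metadata length among eligible chunks (0 if none)
def pvMx (cid : String) (cm : PySem.Dict String String) (lo hi : Nat) :
    List (String × String × (List (String × String)) × String) → Nat
  | [] => 0
  | c :: rest =>
      if pvElig cid cm lo hi c then Nat.max (pvMv c) (pvMx cid cm lo hi rest)
      else pvMx cid cm lo hi rest

-- the descending list [h, h-1, ..., 1]
def pvDesc : Nat → List Nat
  | 0 => []
  | t + 1 => (t + 1) :: pvDesc t

lemma pvIsParent_eq_altSubset (cm : PySem.Dict String String) (l : List (String × String)) :
    pvIsParent cm l = altSubset cm l := by
  induction l with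
  | nil => rfl
  | cons p rest ih =>
      obtain ⟨k, v⟩ := p
      simp only [pvIsParent, altSubset, List.all_cons]
      cases h : cm.get? k with
      | none => simp
      | some w =>
          by_cases hv : w = v
          · simp only [hv]; simpa [altSubset] using ih
          · simp [hv]

lemma pvDescKey (n : Nat) :
    (List.range n).map (fun (k : Nat) => (n : Int) - (k : Int)) = (pvDesc n).map (Nat.cast : Nat → Int) := by
  induction n with
  | zero => simp [pvDesc]
  | succ m ih =>
      rw [List.range_succ_eq_map]
      simp only [List.map_cons, List.map_map, pvDesc]
      congr 1
      rw [← ih]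
      apply List.map_congr_left
      intro k hk
      simp only [Function.comp_apply]
      push_cast
      ring

lemma pvDesc_map_cast (h : Nat) :
    PySem.List.pyRange (h : Int) 0 (-1) = (pvDesc h).map (Nat.cast : Nat → Int) := by
  rw [← pvDescKey]
  cases h with
  | zero => simp [PySem.List.pyRange]
  | succ m =>
      simp only [PySem.List.pyRange]
      norm_num
      intro a _
      ring

lemma find?_congr_mem {α : Type} (l : List α) (p q : α → Bool)
    (h : ∀ a ∈ l, p a = q a) : l.find? p = l.find? q := by
  induction l with
  | nil => rfl
  | cons x xs ih =>
      have hx := h x (by simp)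
      cases hq : q x with
      | true => rw [List.find?_cons_of_pos (hx ▸ hq), List.find?_cons_of_pos hq]
      | false =>
          rw [List.find?_cons_of_neg (by simp [hx, hq]), List.find?_cons_of_neg (by simp [hq]),
            ih (fun a ha => h a (by simp [ha]))]

lemma pvMx_le (cid : String) (cm : PySem.Dict String String) (lo hi : Nat)
    (xs : List (String × String × (List (String × String)) × String)) :
    pvMx cid cm lo hi xs ≤ hi := by
  induction xs with
  | nil => simp [pvMx]
  | cons c rest ih =>
      simp only [pvMx]
      split
      · rename_i hc
        have : pvMv c ≤ hi := by
          simp only [pvElig, Bool.and_eq_true, decide_eq_true_eq] at hc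
          exact hc.2
        simp only [Nat.max_def]; split <;> omega
      · exact ih

lemma pvMx_ge (cid : String) (cm : PySem.Dict String String) (lo hi : Nat)
    (xs : List (String × String × (List (String × String)) × String))
    (c : String × String × (List (String × String)) × String)
    (hmem : c ∈ xs) (hc : pvElig cid cm lo hi c = true) :
    pvMv c ≤ pvMx cid cm lo hi xs := by
  induction xs with
  | nil => cases hmem
  | cons x rest ih =>
      simp only [pvMx]
      rcases List.mem_cons.mp hmem with hmem | hmem
      · subst hmem
        rw [if_pos hc]
        simp only [Nat.max_def]; split <;> omega
      · have h2 := ih hmem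
        split
        · simp only [Nat.max_def]; split <;> omega
        · exact h2

lemma pvMx_cases (cid : String) (cm : PySem.Dict String String) (lo hi : Nat)
    (xs : List (String × String × (List (String × String)) × String)) :
    pvMx cid cm lo hi xs = 0 ∨
      ∃ d ∈ xs, pvElig cid cm lo hi d = true ∧ pvMv d = pvMx cid cm lo hi xs := by
  induction xs with
  | nil => left; rfl
  | cons x rest ih =>
      simp only [pvMx]
      by_cases hx : pvElig cid cm lo hi x = true
      · right
        simp only [hx, if_true]
        rcases ih with h0 | ⟨d, hd, hde, hdm⟩
        · exact ⟨x, by simp, hx, by rw [h0]; simp⟩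
        · rcases Nat.le_total (pvMv x) (pvMx cid cm lo hi rest) with hle | hle
          · exact ⟨d, by simp [hd], hde, by rw [hdm]; simp [Nat.max_def]; omega⟩
          · exact ⟨x, by simp, hx, by simp [Nat.max_def]; omega⟩
      · simp only [hx]
        rcases ih with h0 | ⟨d, hd, hde, hdm⟩
        · exact Or.inl h0
        · exact Or.inr ⟨d, by simp [hd], hde, hdm⟩

lemma pvMx_achieved (cid : String) (cm : PySem.Dict String String) (lo hi : Nat)
    (xs : List (String × String × (List (String × String)) × String))
    (c : String × String × (List (String × String)) × String)
    (hmem : c ∈ xs) (hc : pvElig cid cm lo hi c = true) :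
    ∃ d ∈ xs, pvElig cid cm lo hi d = true ∧ pvMv d = pvMx cid cm lo hi xs := by
  rcases pvMx_cases cid cm lo hi xs with h0 | h
  · exfalso
    have h1 := pvMx_ge cid cm lo hi xs c hmem hc
    have h2 : lo < pvMv c := by
      simp only [pvElig, Bool.and_eq_true, decide_eq_true_eq] at hc
      exact hc.1.2
    omega
  · exact h

lemma pvMx_le_of_forall (cid : String) (cm : PySem.Dict String String) (lo hi K : Nat)
    (xs : List (String × String × (List (String × String)) × String))
    (h : ∀ d ∈ xs, pvElig cid cm lo hi d = true → pvMv d ≤ K) :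
    pvMx cid cm lo hi xs ≤ K := by
  rcases pvMx_cases cid cm lo hi xs with h0 | ⟨d, hd, hde, hdm⟩
  · omega
  · rw [← hdm]; exact h d hd hde

-- shifting the lower bound up to lo' does not change max-with-lo'
lemma pvMx_max_shift (cid : String) (cm : PySem.Dict String String) (lo lo' hi : Nat)
    (hle : lo ≤ lo')
    (xs : List (String × String × (List (String × String)) × String)) :
    Nat.max lo' (pvMx cid cm lo hi xs) = Nat.max lo' (pvMx cid cm lo' hi xs) := by
  induction xs with
  | nil => rfl
  | cons x rest ih =>
      simp only [pvMx, pvElig]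
      by_cases hok : pvOk cid cm x = true
      · by_cases hhi : pvMv x ≤ hi
        · rcases Nat.lt_or_ge lo' (pvMv x) with h1 | h1
          · have h2 : lo < pvMv x := by omega
            simp only [hok, h1, h2, hhi, decide_true, Bool.and_self, if_true]
            simp only [Nat.max_def] at ih ⊢
            split_ifs at ih ⊢ <;> omega
          · have h1' : ¬ lo' < pvMv x := by omega
            rcases Nat.lt_or_ge lo (pvMv x) with h2 | h2
            · simp only [hok, hhi, h2, decide_true, Bool.and_true, if_true, h1',
                decide_false, Bool.and_false]
              simp only [Nat.max_def] at ih ⊢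
              split_ifs at ih ⊢ <;> omega
            · have h2' : ¬ lo < pvMv x := by omega
              simp only [h1', h2', decide_false, Bool.and_false]
              exact ih
        · simp only [hhi, decide_false, Bool.and_false]
          exact ih
      · simp only [Bool.eq_false_iff.mpr hok]
        exact ih

-- B's loop computes: first chunk attaining the maximal eligible length
lemma altLoop_char (cid : String) (cm : PySem.Dict String String) (top : Nat)
    (htop : 1 ≤ top)
    (xs : List (String × String × (List (String × String)) × String))
    (b : Option String) (bl : Nat) :
    altLoop cid cm top xs (b, bl) =
      match xs.find? (fun c => pvElig cid cm bl (top - 1) c &&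
          (pvMv c == pvMx cid cm bl (top - 1) xs)) with
      | none => (b, bl)
      | some c => (some c.1, pvMv c) := by
  induction xs generalizing b bl with
  | nil => rfl
  | cons x rest ih =>
      obtain ⟨id, info, md, sp⟩ := x
      by_cases hid : id = cid
      · have helig : pvElig cid cm bl (top - 1) (id, info, md, sp) = false := by
          simp [pvElig, pvOk, hid]
        rw [show altLoop cid cm top ((id, info, md, sp) :: rest) (b, bl)
            = altLoop cid cm top rest (b, bl) by simp [altLoop, hid]]
        rw [show pvMx cid cm bl (top - 1) ((id, info, md, sp) :: rest)
            = pvMx cid cm bl (top - 1) rest by simp [pvMx, helig]]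
        rw [List.find?_cons_of_neg (by simp [helig])]
        exact ih b bl
      · by_cases hg : bl < (PySem.Dict.ofList md).size ∧ (PySem.Dict.ofList md).size < top
            ∧ altSubset cm (PySem.Dict.ofList md).items
        · -- eligible: strict improvement
          have helig : pvElig cid cm bl (top - 1) (id, info, md, sp) = true := by
            simp only [pvElig, pvOk, pvMv, Bool.and_eq_true, decide_eq_true_eq]
            exact ⟨⟨⟨by simpa using hid, hg.2.2⟩, hg.1⟩, by omega⟩
          have hLHS : altLoop cid cm top ((id, info, md, sp) :: rest) (b, bl)
              = altLoop cid cm top rest (some id, (PySem.Dict.ofList md).size) := by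
            simp [altLoop, hid, hg]
          rw [hLHS, ih (some id) ((PySem.Dict.ofList md).size)]
          have hmv : pvMv (id, info, md, sp) = (PySem.Dict.ofList md).size := rfl
          have hMx : pvMx cid cm bl (top - 1) ((id, info, md, sp) :: rest)
              = Nat.max ((PySem.Dict.ofList md).size) (pvMx cid cm bl (top - 1) rest) := by
            simp [pvMx, helig, hmv]
          cases hfind : rest.find? (fun c => pvElig cid cm ((PySem.Dict.ofList md).size) (top - 1) c &&
              (pvMv c == pvMx cid cm ((PySem.Dict.ofList md).size) (top - 1) rest)) with
          | none =>
              -- nothing strictly better in rest: the head attains the max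
              have hnone : ∀ d ∈ rest, ¬ pvElig cid cm ((PySem.Dict.ofList md).size) (top - 1) d = true := by
                intro d hd hde
                obtain ⟨d0, hd0, hd0e, hd0m⟩ :=
                  pvMx_achieved cid cm ((PySem.Dict.ofList md).size) (top - 1) rest d hd hde
                have := List.find?_eq_none.mp hfind d0 hd0
                simp [hd0e, hd0m] at this
              have hbound : pvMx cid cm bl (top - 1) rest ≤ (PySem.Dict.ofList md).size := by
                apply pvMx_le_of_forall
                intro d hd hde
                by_contra hlt
                apply hnone d hd
                simp only [pvElig, Bool.and_eq_true, decide_eq_true_eq] at hde ⊢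
                exact ⟨⟨hde.1.1, by omega⟩, hde.2⟩
              have hM : pvMx cid cm bl (top - 1) ((id, info, md, sp) :: rest)
                  = (PySem.Dict.ofList md).size := by
                rw [hMx]; simp only [Nat.max_def]; split <;> omega
              rw [List.find?_cons_of_pos (by simp [helig, hmv, hM])]
              simp [pvMv]
          | some d =>
              have hpd := List.find?_some hfind
              have hdm := List.mem_of_find?_eq_some hfind
              simp only [Bool.and_eq_true, beq_iff_eq] at hpd
              obtain ⟨hde, hdM⟩ := hpd
              have hdgt : (PySem.Dict.ofList md).size < pvMv d := by
                simp only [pvElig, Bool.and_eq_true, decide_eq_true_eq] at hde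
                exact hde.1.2
              have hblm : bl < (PySem.Dict.ofList md).size := hg.1
              have hM : pvMx cid cm bl (top - 1) ((id, info, md, sp) :: rest)
                  = pvMx cid cm ((PySem.Dict.ofList md).size) (top - 1) rest := by
                rw [hMx, pvMx_max_shift cid cm bl ((PySem.Dict.ofList md).size) (top - 1) (by omega)]
                simp only [Nat.max_def]; split <;> omega
              have hne : pvMv (id, info, md, sp) ≠ pvMx cid cm bl (top - 1) ((id, info, md, sp) :: rest) := by
                rw [hM, hmv]
                omega
              rw [List.find?_cons_of_neg (by simp [hne])]
              have hcongr : rest.find? (fun c => pvElig cid cm bl (top - 1) c &&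
                    (pvMv c == pvMx cid cm bl (top - 1) ((id, info, md, sp) :: rest)))
                  = rest.find? (fun c => pvElig cid cm ((PySem.Dict.ofList md).size) (top - 1) c &&
                    (pvMv c == pvMx cid cm ((PySem.Dict.ofList md).size) (top - 1) rest)) := by
                apply find?_congr_mem
                intro a _
                rw [hM]
                by_cases ha : pvMv a = pvMx cid cm ((PySem.Dict.ofList md).size) (top - 1) rest
                · simp only [pvElig, ha]
                  have h1 : bl < pvMx cid cm ((PySem.Dict.ofList md).size) (top - 1) rest := by omega
                  have h2 : (PySem.Dict.ofList md).size < pvMx cid cm ((PySem.Dict.ofList md).size) (top - 1) rest := by omega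
                  simp [h1, h2]
                · have hb := beq_eq_false_iff_ne.mpr ha
                  simp [hb]
              rw [hcongr, hfind]
        · -- not eligible: state unchanged
          have helig : pvElig cid cm bl (top - 1) (id, info, md, sp) = false := by
            simp only [pvElig, pvOk, pvMv, Bool.and_eq_false_iff]
            by_cases h1 : bl < (PySem.Dict.ofList md).size
            · by_cases h2 : (PySem.Dict.ofList md).size ≤ top - 1
              · left; left; right
                have : ¬ altSubset cm (PySem.Dict.ofList md).items := by
                  intro hs; exact hg ⟨h1, by omega, hs⟩
                simp [this]
              · right; simp [h2]
            · left; right; simp [h1]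
          rw [show altLoop cid cm top ((id, info, md, sp) :: rest) (b, bl)
              = altLoop cid cm top rest (b, bl) by
            simp only [altLoop]
            rw [if_neg hid, if_neg hg]]
          rw [show pvMx cid cm bl (top - 1) ((id, info, md, sp) :: rest)
              = pvMx cid cm bl (top - 1) rest by simp [pvMx, helig]]
          rw [List.find?_cons_of_neg (by simp [helig])]
          exact ih b bl

-- A's inner loop over all chunks at one target length, as a find?
lemma pvFindAt_char (cid : String) (cm : PySem.Dict String String) (t : Nat)
    (xs : List (String × String × (List (String × String)) × String)) :
    pvFindAt cid cm ((t : Nat) : Int) xs =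
      (xs.find? (fun c => pvOk cid cm c && (pvMv c == t))).map (·.1) := by
  induction xs with
  | nil => rfl
  | cons x rest ih =>
      obtain ⟨id, info, md, sp⟩ := x
      by_cases hid : id = cid
      · rw [show pvFindAt cid cm ((t : Nat) : Int) ((id, info, md, sp) :: rest)
            = pvFindAt cid cm ((t : Nat) : Int) rest by simp [pvFindAt, hid]]
        rw [List.find?_cons_of_neg (by simp [pvOk, hid])]
        exact ih
      · by_cases hsz : (PySem.Dict.ofList md).size = t
        · by_cases hsub : altSubset cm (PySem.Dict.ofList md).items = true
          · rw [show pvFindAt cid cm ((t : Nat) : Int) ((id, info, md, sp) :: rest)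
                = some id by
              simp only [pvFindAt]
              rw [if_neg hid, if_pos (by exact_mod_cast congrArg (Nat.cast : Nat → Int) hsz),
                if_pos (by rw [pvIsParent_eq_altSubset]; exact hsub)]]
            rw [List.find?_cons_of_pos (by simp [pvOk, pvMv, hid, hsz, hsub])]
            rfl
          · rw [show pvFindAt cid cm ((t : Nat) : Int) ((id, info, md, sp) :: rest)
                = pvFindAt cid cm ((t : Nat) : Int) rest by
              simp only [pvFindAt]
              rw [if_neg hid, if_pos (by exact_mod_cast congrArg (Nat.cast : Nat → Int) hsz),
                if_neg (by rw [pvIsParent_eq_altSubset]; simpa using hsub)]]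
            rw [List.find?_cons_of_neg (by simp [pvOk, hsub])]
            exact ih
        · rw [show pvFindAt cid cm ((t : Nat) : Int) ((id, info, md, sp) :: rest)
              = pvFindAt cid cm ((t : Nat) : Int) rest by
            simp only [pvFindAt]
            rw [if_neg hid, if_neg (by exact_mod_cast hsz)]]
          rw [List.find?_cons_of_neg (by simp [pvMv, hsz])]
          exact ih

-- dropping an unattained top length leaves the maximum unchanged
lemma pvMx_drop_top (cid : String) (cm : PySem.Dict String String) (hi : Nat)
    (xs : List (String × String × (List (String × String)) × String))
    (h : ∀ c ∈ xs, ¬ (pvOk cid cm c && (pvMv c == hi + 1)) = true) :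
    pvMx cid cm 0 (hi + 1) xs = pvMx cid cm 0 hi xs := by
  induction xs with
  | nil => rfl
  | cons x rest ih =>
      have hx := h x (by simp)
      have helig : pvElig cid cm 0 (hi + 1) x = pvElig cid cm 0 hi x := by
        simp only [pvElig]
        by_cases hok : pvOk cid cm x = true
        · simp only [Bool.and_eq_true, beq_iff_eq, hok, true_and] at hx
          rw [show decide (pvMv x ≤ hi + 1) = decide (pvMv x ≤ hi) by
            by_cases hle : pvMv x ≤ hi
            · have h2 : pvMv x ≤ hi + 1 := by omega
              simp [hle, h2]
            · have h2 : ¬ pvMv x ≤ hi + 1 := by omega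
              simp [hle, h2]]
        · simp [hok]
      simp only [pvMx, helig]
      split
      · rw [ih (fun c hc => h c (by simp [hc]))]
      · exact ih (fun c hc => h c (by simp [hc]))

-- A's whole scan equals the first-of-maximal-length spec
lemma pvScan_char (cid : String) (cm : PySem.Dict String String) (hi : Nat)
    (xs : List (String × String × (List (String × String)) × String)) :
    pvScan cid cm xs ((pvDesc hi).map (Nat.cast : Nat → Int)) =
      (xs.find? (fun c => pvElig cid cm 0 hi c &&
          (pvMv c == pvMx cid cm 0 hi xs))).map (·.1) := by
  induction hi with
  | zero =>
      rw [show (xs.find? (fun c => pvElig cid cm 0 0 c && (pvMv c == pvMx cid cm 0 0 xs))) = none by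
        apply List.find?_eq_none.mpr
        intro c _
        simp only [pvElig, Bool.and_eq_true, decide_eq_true_eq, not_and]
        intro h _
        omega]
      rfl
  | succ t ih =>
      simp only [pvDesc, List.map_cons, pvScan, pvFindAt_char]
      cases hfind : xs.find? (fun c => pvOk cid cm c && (pvMv c == t + 1)) with
      | some c0 =>
          have hp := List.find?_some hfind
          have hm := List.mem_of_find?_eq_some hfind
          simp only [Bool.and_eq_true, beq_iff_eq] at hp
          have helig : pvElig cid cm 0 (t + 1) c0 = true := by
            simp only [pvElig, Bool.and_eq_true, decide_eq_true_eq]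
            exact ⟨⟨hp.1, by omega⟩, by omega⟩
          have hM : pvMx cid cm 0 (t + 1) xs = t + 1 := by
            have h1 := pvMx_ge cid cm 0 (t + 1) xs c0 hm helig
            have h2 := pvMx_le cid cm 0 (t + 1) xs
            omega
          have hcongr : xs.find? (fun c => pvElig cid cm 0 (t + 1) c && (pvMv c == pvMx cid cm 0 (t + 1) xs))
              = xs.find? (fun c => pvOk cid cm c && (pvMv c == t + 1)) := by
            apply find?_congr_mem
            intro a _
            rw [hM]
            by_cases ha : pvMv a = t + 1
            · simp only [pvElig, ha]
              simp
            · have hb := beq_eq_false_iff_ne.mpr ha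
              simp [hb]
          rw [hcongr, hfind]
          simp
      | none =>
          have hnone := List.find?_eq_none.mp hfind
          have hM := pvMx_drop_top cid cm t xs hnone
          have hcongr : xs.find? (fun c => pvElig cid cm 0 (t + 1) c && (pvMv c == pvMx cid cm 0 (t + 1) xs))
              = xs.find? (fun c => pvElig cid cm 0 t c && (pvMv c == pvMx cid cm 0 t xs)) := by
            apply find?_congr_mem
            intro a hmem
            rw [hM]
            have hx := hnone a hmem
            simp only [pvElig]
            by_cases hok : pvOk cid cm a = true
            · simp only [Bool.and_eq_true, beq_iff_eq, hok, true_and] at hx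
              rw [show decide (pvMv a ≤ t + 1) = decide (pvMv a ≤ t) by
                by_cases hle : pvMv a ≤ t
                · have h2 : pvMv a ≤ t + 1 := by omega
                  simp [hle, h2]
                · have h2 : ¬ pvMv a ≤ t + 1 := by omega
                  simp [hle, h2]]
            · simp [hok]
          rw [hcongr, ← ih]
          rfl

-- ===== VERDICT (by name: the statement is the Claim_ definition above) =====
theorem find_parent_chunk_py_spec : Claim_equal_find_parent_chunk_py := by
  intro cid cml chunks _
  unfold Spec_find_parent_chunk_py find_parent_chunk_py find_parent_chunk_py_alt
  by_cases hL : (PySem.Dict.ofList cml).size ≤ 1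
  · simp [hL]
  · simp only [hL, if_false]
    have hL1 : ((PySem.Dict.ofList cml).size : Int) - 1
        = ((((PySem.Dict.ofList cml).size - 1 : Nat)) : Int) := by omega
    rw [hL1, pvDesc_map_cast, pvScan_char,
      altLoop_char cid (PySem.Dict.ofList cml) (PySem.Dict.ofList cml).size (by omega)]
    cases hfind : ((PySem.Dict.ofList chunks).items).find? (fun c =>
        pvElig cid (PySem.Dict.ofList cml) 0 ((PySem.Dict.ofList cml).size - 1) c &&
        (pvMv c == pvMx cid (PySem.Dict.ofList cml) 0 ((PySem.Dict.ofList cml).size - 1)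
          (PySem.Dict.ofList chunks).items)) with
    | none => simp
    | some c => simp
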